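-- pv_equiv track=rewrite | github.com/Anoushka222/DAA-Project- | bandwidth_app.py | greedy_allocation
-- ===== SOURCE A (Python) =====
-- def greedy_allocation(total_bandwidth, demands):
--     allocation = []
--     remaining = total_bandwidth
--     for d in sorted(demands, reverse=True):
--         alloc = min(d, remaining)
--         allocation.append(alloc)
--         remaining -= alloc
--         if remaining <= 0:
--             break
--     return allocation, total_bandwidth - remaining
-- ===== SOURCE B (Python) =====
-- def greedy_allocation(total_bandwidth, demands):
--     # Selection-based: never sorts; each round extracts the maximum of the
--     # remaining pool (max + remove) and allocates against an ascending
--     # 'served' counter instead of a descending remaining budget.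
--     pool = list(demands)
--     allocation = []
--     served = 0
--     while pool:
--         m = max(pool)
--         pool.remove(m)
--         alloc = min(m, total_bandwidth - served)
--         allocation.append(alloc)
--         served += alloc
--         if served >= total_bandwidth:
--             break
--     return allocation, served
-- ===== Notes on version B (the rewrite author's own statement) =====
-- stated objective: alternative
-- what changed: B never sorts: a selection loop extracts the maximum of the remaining pool each round (max + remove) and allocates min(max, budget - served) against an ascending served counter, stopping once served reaches the budget; the served total is returned directly instead of being reconstructed from a mutated remaining-budget variable.
import Mathlib
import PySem

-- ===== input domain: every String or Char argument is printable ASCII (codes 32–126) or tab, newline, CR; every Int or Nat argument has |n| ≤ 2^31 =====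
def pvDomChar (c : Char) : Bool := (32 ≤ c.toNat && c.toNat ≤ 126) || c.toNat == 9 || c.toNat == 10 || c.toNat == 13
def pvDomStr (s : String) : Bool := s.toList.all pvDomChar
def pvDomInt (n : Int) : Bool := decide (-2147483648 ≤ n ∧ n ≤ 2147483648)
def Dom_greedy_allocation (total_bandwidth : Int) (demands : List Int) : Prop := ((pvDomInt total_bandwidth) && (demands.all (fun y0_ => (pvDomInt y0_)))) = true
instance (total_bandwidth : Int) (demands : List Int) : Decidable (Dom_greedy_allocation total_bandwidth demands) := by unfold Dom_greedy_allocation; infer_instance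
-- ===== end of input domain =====

-- B drops the sort entirely: a selection loop extracts the maximum of the remaining
-- pool each round (max + remove) and allocates against an ascending served counter
-- (alternative algorithm/data handling, same result).

-- ===== PORT A =====
-- the for-loop of A: state is (allocation, remaining)
def greedyA_loop : List Int → List Int → Int → List Int × Int
  | [], allocation, remaining => (allocation, remaining)
  | d :: rest, allocation, remaining =>
    let alloc := min d remaining
    let allocation' := allocation ++ [alloc]
    let remaining' := remaining - alloc
    if remaining' ≤ 0 then (allocation', remaining')
    else greedyA_loop rest allocation' remaining'

def greedy_allocation (total_bandwidth : Int) (demands : List Int) : List Int × Int :=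
  let p := greedyA_loop (PySem.List.sorted demands (fun d => d) true) [] total_bandwidth
  (p.1, total_bandwidth - p.2)

-- ===== PORT B =====
-- B's while-loop: state is (pool, allocation, served); max(pool) is PySem.List.max?
-- (no key; none = empty pool, ending the loop); pool.remove(m) with m ∈ pool is
-- pool.erase m (PySem.List.remove?_eq_some_erase).
def greedyB_loop (total : Int) : List Int → List Int → Int → List Int × Int
  | pool, allocation, served =>
    match hm : PySem.List.max? pool (fun y => y) with
    | none => (allocation, served)
    | some m =>
      let pool' := pool.erase m
      let alloc := min m (total - served)
      let allocation' := allocation ++ [alloc]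
      let served' := served + alloc
      if served' ≥ total then (allocation', served')
      else greedyB_loop total pool' allocation' served'
termination_by pool _ _ => pool.length
decreasing_by
  have hmem : m ∈ pool := PySem.List.max?_mem hm
  have := List.length_erase_of_mem hmem
  have : 0 < pool.length := List.length_pos_of_mem hmem
  simp [List.length_erase_of_mem hmem]
  omega

def greedy_allocation_alt (total_bandwidth : Int) (demands : List Int) : List Int × Int :=
  greedyB_loop total_bandwidth demands [] 0

-- ===== PRECONDITION & SPEC =====
def Spec_greedy_allocation (total_bandwidth : Int) (demands : List Int) (out : List Int × Int) : Prop := out = greedy_allocation_alt total_bandwidth demands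
instance (total_bandwidth : Int) (demands : List Int) (out : List Int × Int) : Decidable (Spec_greedy_allocation total_bandwidth demands out) := by unfold Spec_greedy_allocation; infer_instance

-- ===== CLAIM (what is proved, stated in full; the proofs are below) =====
def Claim_equal_greedy_allocation : Prop := ∀ (total_bandwidth : Int) (demands : List Int), Dom_greedy_allocation total_bandwidth demands → Spec_greedy_allocation total_bandwidth demands (greedy_allocation total_bandwidth demands)

-- ===== LEMMAS AND PROOFS =====

-- common specification recursion on the already-descending list
def gaSpec : List Int → Int → List Int
  | [], _ => []
  | d :: t, r =>
    let a := min d r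
    if r - a ≤ 0 then [a] else a :: gaSpec t (r - a)

-- A's loop computes gaSpec and remaining = r - sum
theorem greedyA_loop_eq : ∀ (l pre : List Int) (r : Int),
    greedyA_loop l pre r = (pre ++ gaSpec l r, r - (gaSpec l r).sum) := by
  intro l
  induction l with
  | nil => intro pre r; simp [greedyA_loop, gaSpec]
  | cons d t ih =>
    intro pre r
    simp only [greedyA_loop, gaSpec]
    by_cases h : r - min d r ≤ 0
    · simp [h]
    · simp only [h, ih (pre ++ [min d r]) (r - min d r)]
      simp [List.append_assoc]
      omega

-- extracting the first maximum is taking the head of the descending sort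
theorem sortedDesc_cons_max (pool : List Int) (m : Int)
    (hm : PySem.List.max? pool (fun y => y) = some m) :
    PySem.List.sorted pool (fun y => y) true = m :: PySem.List.sorted (pool.erase m) (fun y => y) true := by
  have hmem : m ∈ pool := PySem.List.max?_mem hm
  apply List.Perm.eq_of_pairwise (le := fun a b : Int => b ≤ a)
        (fun a b _ _ h1 h2 => le_antisymm h2 h1) ?_ ?_ ?_
  · exact PySem.List.sorted_pairwise_rev ..
  · refine List.Pairwise.cons ?_ (PySem.List.sorted_pairwise_rev ..)
    intro y hy
    have : y ∈ pool.erase m := (PySem.List.mem_sorted ..).mp hy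
    exact PySem.List.max?_isMax hm y (List.mem_of_mem_erase this)
  · exact (PySem.List.sorted_perm ..).trans
      ((List.perm_cons_erase hmem).trans
        (List.Perm.cons m (PySem.List.sorted_perm ..)).symm)

-- B's selection loop computes gaSpec of the descending sort, with served = c + sum
theorem greedyB_loop_eq (total : Int) : ∀ (pool pre : List Int) (c : Int),
    greedyB_loop total pool pre c
      = (pre ++ gaSpec (PySem.List.sorted pool (fun y => y) true) (total - c),
         c + (gaSpec (PySem.List.sorted pool (fun y => y) true) (total - c)).sum) := by
  intro pool
  induction hn : pool.length using Nat.strong_induction_on generalizing pool with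
  | _ n ih =>
    intro pre c
    rw [greedyB_loop]
    cases hm : PySem.List.max? pool (fun y => y) with
    | none =>
      have : pool = [] := (PySem.List.max?_eq_none_iff _ _).mp hm
      subst this
      simp [gaSpec, PySem.List.sorted]
    | some m =>
      have hmem : m ∈ pool := PySem.List.max?_mem hm
      rw [sortedDesc_cons_max pool m hm]
      simp only [gaSpec]
      by_cases h : c + min m (total - c) ≥ total
      · rw [if_pos h]
        have : total - c - min m (total - c) ≤ 0 := by omega
        simp [this]
      · rw [if_neg h]
        have hlen : (pool.erase m).length < n := by
          rw [← hn, List.length_erase_of_mem hmem]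
          have := List.length_pos_of_mem hmem; omega
        rw [ih _ hlen _ rfl (pre ++ [min m (total - c)]) (c + min m (total - c))]
        have h2 : ¬ (total - c - min m (total - c) ≤ 0) := by omega
        simp only [if_neg h2]
        have h3 : total - (c + min m (total - c)) = total - c - min m (total - c) := by omega
        rw [h3]
        simp [List.append_assoc]
        omega

-- ===== VERDICT (by name: the statement is the Claim_ definition above) =====
theorem greedy_allocation_spec : Claim_equal_greedy_allocation := by
  intro total demands _
  unfold Spec_greedy_allocation greedy_allocation greedy_allocation_alt
  rw [greedyA_loop_eq, greedyB_loop_eq]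
  simp
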